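-- pv_equiv track=rewrite | github.com/chaewon-io/Algorithm | 프로그래머스/2/42578. 의상/의상.py | solution
-- ===== SOURCE A (Python) =====
-- def solution(clothes):
--     clothes_dict = {}
--
--     for _, kind in clothes:
--         if kind in clothes_dict:
--             clothes_dict[kind] += 1
--         else:
--             clothes_dict[kind] = 1
--
--     combinations = 1
--     for count in clothes_dict.values():
--         combinations *= (count + 1)
--
--     return combinations - 1
-- ===== SOURCE B (Python) =====
-- def solution(clothes):
--     kinds = sorted(kind for _, kind in clothes)
--     if not kinds:
--         return 0
--     acc = 1
--     cur = kinds[0]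
--     run = 1
--     for k in kinds[1:]:
--         if k == cur:
--             run += 1
--         else:
--             acc *= run + 1
--             cur, run = k, 1
--     acc *= run + 1
--     return acc - 1
-- ===== Notes on version B (the rewrite author's own statement) =====
-- stated objective: alternative
-- what changed: Replaces the hash-dict tally with sort-then-scan: kinds are sorted and consecutive equal runs are counted in one pass, multiplying (run+1) on the fly instead of building a dict of counts.
import Mathlib
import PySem

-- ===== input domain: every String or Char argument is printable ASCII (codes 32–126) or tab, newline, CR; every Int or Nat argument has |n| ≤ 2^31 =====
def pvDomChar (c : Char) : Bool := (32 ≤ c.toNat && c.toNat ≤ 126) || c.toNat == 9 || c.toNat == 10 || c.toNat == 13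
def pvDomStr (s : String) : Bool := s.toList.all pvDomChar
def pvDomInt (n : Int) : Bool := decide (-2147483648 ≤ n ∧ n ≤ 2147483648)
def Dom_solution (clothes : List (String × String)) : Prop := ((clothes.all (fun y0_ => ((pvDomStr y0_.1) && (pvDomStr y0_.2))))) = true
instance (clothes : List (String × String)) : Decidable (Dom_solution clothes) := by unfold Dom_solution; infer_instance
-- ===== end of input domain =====

-- B replaces A's hash-dict tally with sort-then-scan over consecutive equal runs; alternative decomposition, same result.

-- ===== PORT A =====
def solution (clothes : List (String × String)) : Int :=
  let d := clothes.foldl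
    (fun d c => if d.contains c.2 then d.insert c.2 (d.getD c.2 0 + 1) else d.insert c.2 1)
    (PySem.Dict.empty : PySem.Dict String Int)
  let combinations := d.values.foldl (fun acc count => acc * (count + 1)) (1 : Int)
  combinations - 1

-- ===== PORT B =====
-- run-length scan over the sorted kinds: cur = current kind, run = its run length so far
def altGo : List String → String → Int → Int → Int
  | [], _, run, acc => acc * (run + 1)
  | k :: t, cur, run, acc =>
      if k = cur then altGo t cur (run + 1) acc else altGo t k 1 (acc * (run + 1))

def solution_alt (clothes : List (String × String)) : Int :=
  match PySem.List.sorted (clothes.map (·.2)) (fun x => x) false with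
  | [] => 0
  | k :: t => altGo t k 1 1 - 1

-- ===== PRECONDITION & SPEC =====
def Spec_solution (clothes : List (String × String)) (out : Int) : Prop := out = solution_alt clothes
instance (clothes : List (String × String)) (out : Int) : Decidable (Spec_solution clothes out) := by unfold Spec_solution; infer_instance

-- ===== CLAIM (what is proved, stated in full; the proofs are below) =====
def Claim_equal_solution : Prop := ∀ (clothes : List (String × String)), Dom_solution clothes → Spec_solution clothes (solution clothes)

-- ===== LEMMAS AND PROOFS =====

-- the common value both programs compute: ∏ over distinct kinds of (count + 1)
def fprod (l : List String) : Int :=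
  ((PySem.Set.ofList l).map (fun k => (l.count k : Int) + 1)).prod

theorem fprod_nil : fprod [] = 1 := rfl

theorem fprod_eq_nodup (l ds : List String) (hnd : ds.Nodup)
    (hm : ∀ x, x ∈ ds ↔ x ∈ l) :
    fprod l = (ds.map (fun k => (l.count k : Int) + 1)).prod := by
  have hp : (PySem.Set.ofList l).Perm ds :=
    (List.perm_ext_iff_of_nodup (PySem.Set.nodup_ofList _) hnd).2
      (fun x => by rw [PySem.Set.mem_ofList _ x, hm])
  exact (hp.map _).prod_eq

theorem fprod_perm {l l' : List String} (h : l.Perm l') : fprod l = fprod l' := by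
  rw [fprod_eq_nodup l (PySem.Set.ofList l') (PySem.Set.nodup_ofList _)
        (fun x => by rw [PySem.Set.mem_ofList _ x, h.mem_iff])]
  unfold fprod
  exact congrArg List.prod (List.map_congr_left (fun k _ => by rw [h.count_eq]))

theorem fprod_cons_split (k : String) (t : List String) :
    fprod (k :: t) = ((t.count k : Int) + 2) * fprod (t.filter (fun x => x ≠ k)) := by
  have hnd : (k :: PySem.Set.ofList (t.filter (fun x => x ≠ k))).Nodup := by
    refine List.nodup_cons.2 ⟨?_, PySem.Set.nodup_ofList _⟩
    intro hk
    have := (PySem.Set.mem_ofList _ _).1 hk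
    have := List.of_mem_filter this
    simp at this
  have hm : ∀ x, x ∈ (k :: PySem.Set.ofList (t.filter (fun x => x ≠ k))) ↔ x ∈ k :: t := by
    intro x
    by_cases hx : x = k
    · simp [hx]
    · simp [PySem.Set.mem_ofList, List.mem_filter, hx]
  rw [fprod_eq_nodup (k :: t) _ hnd hm]
  simp only [List.map_cons, List.prod_cons]
  have hc : ((k :: t).count k : Int) + 1 = (t.count k : Int) + 2 := by
    rw [List.count_cons_self]; push_cast; ring
  rw [hc]
  congr 1
  rw [fprod_eq_nodup (t.filter (fun x => x ≠ k)) (PySem.Set.ofList (t.filter (fun x => x ≠ k)))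
        (PySem.Set.nodup_ofList _) (fun x => PySem.Set.mem_ofList _ x)]
  apply congrArg List.prod
  apply List.map_congr_left
  intro x hx
  have hxf := (PySem.Set.mem_ofList _ _).1 hx
  have hxk : x ≠ k := by
    have := List.of_mem_filter hxf; simpa using this
  have h1 : (k :: t).count x = t.count x := by simp [Ne.symm hxk]
  have h2 : (t.filter (fun x => x ≠ k)).count x = t.count x := by
    rw [List.count_filter]
    simp [hxk]
  rw [h1, h2]

theorem altGo_eq (l : List String) (cur : String) (run acc : Int)
    (hp : l.Pairwise (· ≤ ·)) (hb : ∀ x ∈ l, cur ≤ x) :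
    altGo l cur run acc
      = acc * (run + (l.count cur : Int) + 1) * fprod (l.filter (fun x => x ≠ cur)) := by
  induction l generalizing cur run acc with
  | nil => simp [altGo, fprod_nil]
  | cons k t ih =>
    have hkt : ∀ x ∈ t, k ≤ x := (fun x hx => List.rel_of_pairwise_cons hp hx)
    have hp' : t.Pairwise (· ≤ ·) := hp.of_cons
    by_cases hk : k = cur
    · subst hk
      rw [show altGo (k :: t) k run acc = altGo t k (run + 1) acc from by simp [altGo],
          ih k (run + 1) acc hp' hkt]
      rw [List.count_cons_self]
      have : (k :: t).filter (fun x => x ≠ k) = t.filter (fun x => x ≠ k) := by simp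
      rw [this]
      push_cast; ring
    · have hck : cur < k := lt_of_le_of_ne (hb k (List.mem_cons_self)) (fun h => hk h.symm)
      have hcurnot : cur ∉ k :: t := by
        intro hmem
        rcases List.mem_cons.1 hmem with h | h
        · exact absurd h.symm (ne_of_gt hck)
        · exact absurd rfl (ne_of_gt (lt_of_lt_of_le hck (hkt cur h)))
      rw [show altGo (k :: t) cur run acc = altGo t k 1 (acc * (run + 1)) from by simp [altGo, hk],
          ih k 1 (acc * (run + 1)) hp' hkt]
      have hcnt : (k :: t).count cur = 0 := List.count_eq_zero.2 hcurnot
      have hfil : (k :: t).filter (fun x => x ≠ cur) = k :: t := by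
        apply List.filter_eq_self.2
        intro x hx
        simp only [ne_eq, decide_eq_true_eq]
        intro h; exact hcurnot (h ▸ hx)
      rw [hcnt, hfil, fprod_cons_split]
      push_cast; ring

-- A computes fprod of the kinds list
theorem solution_eq_fprod (clothes : List (String × String)) :
    solution clothes = fprod (clothes.map (·.2)) - 1 := by
  have hstep : (fun (d : PySem.Dict String Int) (c : String × String) =>
      if d.contains c.2 then d.insert c.2 (d.getD c.2 0 + 1) else d.insert c.2 1)
      = fun d c => d.insert c.2 (d.getD c.2 0 + 1) := by
    funext d c
    split_ifs with h
    · rfl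
    · rw [PySem.Dict.getD_of_not_contains d 0 (Bool.eq_false_iff.2 h)]; norm_num
  have hvals : (PySem.Dict.counter (clothes.map (·.2))).values
      = (PySem.Set.ofList (clothes.map (·.2))).map (fun k => ((clothes.map (·.2)).count k : Int)) := by
    show ((PySem.Dict.counter (clothes.map (·.2))).items.map (·.2)) = _
    rw [PySem.Dict.items_counter, List.map_map]
    rfl
  have hmul : ∀ (l : List Int) (a : Int),
      l.foldl (fun acc c => acc * (c + 1)) a = a * (l.map (· + 1)).prod := by
    intro l
    induction l with
    | nil => intro a; simp [List.foldl]
    | cons h t iht => intro a; simp only [List.foldl, List.map, List.prod_cons, iht]; ring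
  rw [show solution clothes
      = ((clothes.foldl
          (fun (d : PySem.Dict String Int) c =>
            if d.contains c.2 then d.insert c.2 (d.getD c.2 0 + 1) else d.insert c.2 1)
          PySem.Dict.empty).values.foldl (fun acc count => acc * (count + 1)) (1 : Int)) - 1
      from rfl,
    hstep,
    show clothes.foldl
        (fun (d : PySem.Dict String Int) c => d.insert c.2 (d.getD c.2 0 + 1)) PySem.Dict.empty
      = PySem.Dict.counter (clothes.map (·.2))
      from by rw [← PySem.Dict.foldl_insert_getD_add_one_eq_counter, List.foldl_map],
    hvals, hmul]
  unfold fprod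
  rw [List.map_map, one_mul]
  rfl

-- B computes fprod of the kinds list
theorem solution_alt_eq_fprod (clothes : List (String × String)) :
    solution_alt clothes = fprod (clothes.map (·.2)) - 1 := by
  unfold solution_alt
  have hperm : (PySem.List.sorted (clothes.map (·.2)) (fun x => x) false).Perm (clothes.map (·.2)) :=
    PySem.List.sorted_perm _ _ _
  have hpair : (PySem.List.sorted (clothes.map (·.2)) (fun x => x) false).Pairwise (· ≤ ·) :=
    PySem.List.sorted_pairwise _ _
  cases hs : PySem.List.sorted (clothes.map (·.2)) (fun x => x) false with
  | nil =>
    have h0 : clothes.map (·.2) = [] := (hs ▸ hperm).nil_eq.symm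
    show (0 : Int) = fprod (clothes.map (·.2)) - 1
    rw [h0, fprod_nil]; norm_num
  | cons k t =>
    rw [hs] at hperm hpair
    have hb : ∀ x ∈ t, k ≤ x := fun x hx => List.rel_of_pairwise_cons hpair hx
    show altGo t k 1 1 - 1 = fprod (clothes.map (·.2)) - 1
    rw [altGo_eq t k 1 1 hpair.of_cons hb, ← fprod_perm hperm, fprod_cons_split]
    ring_nf

-- ===== VERDICT (by name: the statement is the Claim_ definition above) =====
theorem solution_spec : Claim_equal_solution := by
  intro clothes _
  unfold Spec_solution
  rw [solution_eq_fprod, solution_alt_eq_fprod]
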